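-- pv_equiv track=rewrite | github.com/Samuel-Girma07/telegram | summarizer.py | _group_by_user
-- ===== SOURCE A (Python) =====
-- def _group_by_user(messages_list):
--     """Group messages and format with speaker attribution"""
--     formatted_parts = []
--     current_user = None
--     current_messages = []
--
--     for msg in messages_list:
--         user_name = msg[0]
--         message_text = msg[1][:200]  # Truncate long messages
--
--         if user_name == current_user:
--             current_messages.append(message_text)
--         else:
--             if current_user and current_messages:
--                 combined = " ".join(current_messages)
--                 formatted_parts.append(f"{current_user} said: {combined}.")
--             current_user = user_name
--             current_messages = [message_text]
--
--     # Don't forget the last group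
--     if current_user and current_messages:
--         combined = " ".join(current_messages)
--         formatted_parts.append(f"{current_user} said: {combined}.")
--
--     return " ".join(formatted_parts)
-- ===== SOURCE B (Python) =====
-- def _group_by_user(messages_list):
--     # Phase 1: build the list of consecutive runs [(user, [truncated texts...])].
--     runs = []
--     for user, text in messages_list:
--         snippet = text[:200]
--         if runs and runs[-1][0] == user:
--             runs[-1][1].append(snippet)
--         else:
--             runs.append((user, [snippet]))
--     # Phase 2: format, skipping falsy (empty) usernames.
--     return " ".join(
--         f"{user} said: {' '.join(texts)}." for user, texts in runs if user
--     )
-- ===== Notes on version B (the rewrite author's own statement) =====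
-- stated objective: idiomatic
-- what changed: B splits A's single stateful scan (current_user/current_messages with duplicated flush logic) into two phases: build the list of consecutive runs by appending to the last run, then format-and-filter the runs in one join.
import Mathlib
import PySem

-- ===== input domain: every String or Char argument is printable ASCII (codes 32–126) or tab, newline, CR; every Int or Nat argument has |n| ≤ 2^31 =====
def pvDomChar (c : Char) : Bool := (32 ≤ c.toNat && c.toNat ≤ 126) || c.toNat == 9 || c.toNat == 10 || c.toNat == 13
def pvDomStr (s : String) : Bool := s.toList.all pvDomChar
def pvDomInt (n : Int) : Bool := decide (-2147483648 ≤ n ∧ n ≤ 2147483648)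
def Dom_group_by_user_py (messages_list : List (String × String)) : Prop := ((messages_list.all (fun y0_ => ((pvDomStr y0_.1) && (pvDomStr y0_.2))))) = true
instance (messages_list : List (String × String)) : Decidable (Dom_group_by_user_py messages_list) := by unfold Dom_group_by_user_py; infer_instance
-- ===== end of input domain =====

-- B replaces A's manual current_user/current_messages/flush tracking by a two-phase
-- decomposition (build the list of consecutive runs, then format-and-filter): idiomatic, no speed claim.

-- ===== PORT A =====
-- Python truthiness of `current_user` (None or a string)
def aTruthy : Option String → Bool
  | none => false
  | some s => !(s == "")

def aFmt (u : String) (cm : List String) : String :=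
  u ++ " said: " ++ PySem.Str.join " " cm ++ "."

-- the `if current_user and current_messages: formatted_parts.append(...)` step of A
def aFlush (cu : Option String) (cm : List String) : List String :=
  if aTruthy cu && !cm.isEmpty then [aFmt (cu.getD "") cm] else []

def aStep (st : List String × Option String × List String) (msg : String × String) :
    List String × Option String × List String :=
  let user_name := msg.1
  let message_text := PySem.Str.slice msg.2 none (some 200)  -- msg[1][:200]
  if some user_name == st.2.1 then
    (st.1, st.2.1, st.2.2 ++ [message_text])
  else
    (st.1 ++ aFlush st.2.1 st.2.2, some user_name, [message_text])

def group_by_user_py (messages_list : List (String × String)) : String :=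
  let st := messages_list.foldl aStep (([] : List String), (none : Option String), ([] : List String))
  PySem.Str.join " " (st.1 ++ aFlush st.2.1 st.2.2)

-- ===== PORT B =====
-- phase 1: fold each message into the runs list (append to the last run or start a new one)
def bStep (runs : List (String × List String)) (msg : String × String) :
    List (String × List String) :=
  let snippet := PySem.Str.slice msg.2 none (some 200)  -- text[:200]
  match runs.getLast? with
  | some last =>
      if last.1 == msg.1 then runs.dropLast ++ [(last.1, last.2 ++ [snippet])]
      else runs ++ [(msg.1, [snippet])]
  | none => runs ++ [(msg.1, [snippet])]

def bFmt (g : String × List String) : String :=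
  g.1 ++ " said: " ++ PySem.Str.join " " g.2 ++ "."

def group_by_user_py_alt (messages_list : List (String × String)) : String :=
  let runs := messages_list.foldl bStep []
  PySem.Str.join " " ((runs.filter (fun g => !(g.1 == ""))).map bFmt)

-- ===== PRECONDITION & SPEC =====
def Spec_group_by_user_py (messages_list : List (String × String)) (out : String) : Prop := out = group_by_user_py_alt messages_list
instance (messages_list : List (String × String)) (out : String) : Decidable (Spec_group_by_user_py messages_list out) := by unfold Spec_group_by_user_py; infer_instance

-- ===== CLAIM (what is proved, stated in full; the proofs are below) =====
def Claim_equal_group_by_user_py : Prop := ∀ (messages_list : List (String × String)), Dom_group_by_user_py messages_list → Spec_group_by_user_py messages_list (group_by_user_py messages_list)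

-- ===== LEMMAS AND PROOFS =====

-- B's phase 2 applied to a runs list
def fmtList (R : List (String × List String)) : List String :=
  (R.filter (fun g => !(g.1 == ""))).map bFmt

theorem fmtList_append (R S : List (String × List String)) :
    fmtList (R ++ S) = fmtList R ++ fmtList S := by
  simp [fmtList]

-- flushing the current group = formatting one run (for a nonempty group)
theorem aFlush_eq_fmtList (u : String) (cm : List String) (h : cm ≠ []) :
    aFlush (some u) cm = fmtList [(u, cm)] := by
  have : cm.isEmpty = false := by simpa [List.isEmpty_iff] using h
  by_cases hu : u = "" <;>
    simp [aFlush, aTruthy, fmtList, aFmt, bFmt, this, hu]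

-- invariant: A's (parts, current_user, current_messages) corresponds to B's runs R ++ [(u, cm)]
theorem main_inv (l : List (String × String)) :
    ∀ (R : List (String × List String)) (u : String) (cm : List String), cm ≠ [] →
      (let st := l.foldl aStep (fmtList R, some u, cm)
       PySem.Str.join " " (st.1 ++ aFlush st.2.1 st.2.2))
        = PySem.Str.join " " (fmtList (l.foldl bStep (R ++ [(u, cm)]))) := by
  induction l with
  | nil =>
      intro R u cm h
      simp [fmtList_append, aFlush_eq_fmtList u cm h]
  | cons p rest ih =>
      intro R u cm h
      obtain ⟨v, t⟩ := p
      by_cases hvu : v = u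
      · subst hvu
        have hA : aStep (fmtList R, some v, cm) (v, t)
            = (fmtList R, some v, cm ++ [PySem.Str.slice t none (some 200)]) := by
          simp [aStep]
        have hB : bStep (R ++ [(v, cm)]) (v, t)
            = R ++ [(v, cm ++ [PySem.Str.slice t none (some 200)])] := by
          simp [bStep]
        simpa [List.foldl_cons, hA, hB] using
          ih R v (cm ++ [PySem.Str.slice t none (some 200)]) (by simp)
      · have hA : aStep (fmtList R, some u, cm) (v, t)
            = (fmtList R ++ aFlush (some u) cm, some v, [PySem.Str.slice t none (some 200)]) := by
          simp [aStep, hvu]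
        have hB : bStep (R ++ [(u, cm)]) (v, t)
            = (R ++ [(u, cm)]) ++ [(v, [PySem.Str.slice t none (some 200)])] := by
          have hne : (u == v) = false := by
            simp; exact fun hh => hvu hh.symm
          simp [bStep, hne]
        have := ih (R ++ [(u, cm)]) v [PySem.Str.slice t none (some 200)] (by simp)
        simpa [List.foldl_cons, hA, hB, aFlush_eq_fmtList u cm h, fmtList_append] using this

-- ===== VERDICT (by name: the statement is the Claim_ definition above) =====
theorem group_by_user_py_spec : Claim_equal_group_by_user_py := by
  intro l _
  unfold Spec_group_by_user_py group_by_user_py group_by_user_py_alt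
  cases l with
  | nil => rfl
  | cons p rest =>
      obtain ⟨u, t⟩ := p
      have hA : aStep ([], none, []) (u, t)
          = (([] : List String), some u, [PySem.Str.slice t none (some 200)]) := by
        simp [aStep, aFlush]
      have hB : bStep [] (u, t) = [(u, [PySem.Str.slice t none (some 200)])] := by
        simp [bStep]
      have := main_inv rest [] u [PySem.Str.slice t none (some 200)] (by simp)
      simpa [List.foldl_cons, hA, hB, fmtList] using this
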